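-- pv_equiv track=rewrite | github.com/johnk2280/algorithms | Lesson_9_task_1.py | get_count1
-- ===== SOURCE A (Python) =====
-- from collections import Counter
--
-- def get_count1(s: str):
--     """
--     По условиям задачи, функция принимает на вход строку состоящую только из строчных латинских букв.
--     Данная функция производит хеш среза переданной строки и записывает его в словарь counter().
--     """
--
--     len_s = len(s)
--     letter = 26
--     spam = set()
--     result = Counter()
--
--     assert len_s > 0, 'String cannot be empty!'
--
--     for i in range(len_s):
--
--         """Первый цикл будет сдвигать начало среза вправо."""
--
--         for j in range(1, len_s):
--
--             """
--             Во втором цикле получаем подстроку (среза строки).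
--             И проверяем ее на уникальность.
--             Можно не делать проверку на уникальность, функция при этом будет работать значительно медленнее.
--             """
--
--             index = 0
--             subs = s[i: i + j]
--
--             if subs not in spam:
--                 spam.add(subs)
--
--                 for k, char in enumerate(subs):
--
--                     """В третьем цикле хешируем подстроку, и записываем в result по окончании цикла."""
--
--                     index += (ord(char) - 96) * (letter ** k)
--
--                 result[index] += 1
--
--     return result
-- ===== SOURCE B (Python) =====
-- from collections import Counter
--
-- def get_count1(s: str):
--     """Single pass per start position: the hash is updated incrementally as the
--     substring grows, instead of re-hashing every slice from scratch."""
--     n = len(s)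
--     assert n > 0, 'String cannot be empty!'
--     seen = set()
--     result = Counter()
--     for i in range(n):
--         subs = ''
--         h = 0
--         p = 1
--         for c in s[i:i + n - 1]:
--             subs += c
--             h += (ord(c) - 96) * p
--             p *= 26
--             if subs not in seen:
--                 seen.add(subs)
--                 result[h] += 1
--     return result
-- ===== Notes on version B (the rewrite author's own statement) =====
-- stated objective: faster
-- what changed: Instead of slicing every s[i:i+j] and re-hashing it character by character with a fresh 26**k power each time, B walks each start position once, growing the substring and updating its base-26 hash and power incrementally, and bounds the scan by the string end so clamped duplicate slices are never re-examined.
import Mathlib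
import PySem

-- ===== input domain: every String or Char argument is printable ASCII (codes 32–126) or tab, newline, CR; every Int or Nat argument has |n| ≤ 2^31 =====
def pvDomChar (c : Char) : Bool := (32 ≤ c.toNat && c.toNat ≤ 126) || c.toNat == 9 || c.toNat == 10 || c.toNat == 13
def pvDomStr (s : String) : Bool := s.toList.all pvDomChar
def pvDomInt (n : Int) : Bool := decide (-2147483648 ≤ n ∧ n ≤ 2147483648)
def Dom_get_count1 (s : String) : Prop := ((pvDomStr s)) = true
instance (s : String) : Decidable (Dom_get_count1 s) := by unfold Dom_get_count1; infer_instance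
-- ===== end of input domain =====

-- B replaces A's per-slice re-hashing (and A's repeated re-scan of already clamped slices)
-- by one incrementally updated base-26 hash per start position; objective: faster.

-- ===== PORT A =====
-- A's per-substring hash: the enumerate loop (Python's 'letter ** k' ported as 26 ^ k.toNat; k ≥ 0 always)
def pvHashA (subs : List Char) : Int :=
  (PySem.List.enumerate subs 0).foldl
    (fun acc kc => acc + ((kc.2.toNat : Int) - 96) * 26 ^ kc.1.toNat) 0

-- A's inner-loop body on the state (spam, result); 'result[index] += 1' on a Counter is
-- getitem-with-default-0 followed by setitem, i.e. insert index (getD index 0 + 1)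
def pvStepA (st : PySem.Set (List Char) × PySem.Dict Int Int) (subs : List Char) :
    PySem.Set (List Char) × PySem.Dict Int Int :=
  if PySem.Set.contains st.1 subs then st
  else (PySem.Set.add st.1 subs,
        st.2.insert (pvHashA subs) (st.2.getD (pvHashA subs) 0 + 1))

def get_count1 (s : String) : List (Int × Int) :=
  let cs := s.toList
  let n : Int := PySem.Str.len s
  ((PySem.List.pyRange 0 n 1).foldl (fun st i =>
      (PySem.List.pyRange 1 n 1).foldl (fun st j =>
        pvStepA st (PySem.List.slice cs (some i) (some (i + j)))) st)
    ((PySem.Set.empty : PySem.Set (List Char)), (PySem.Dict.empty : PySem.Dict Int Int))).2.items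

-- ===== PORT B =====
-- B's inner-loop body on the state ((seen, result), subs, h, p)
def pvStepB (a : (PySem.Set (List Char) × PySem.Dict Int Int) × List Char × Int × Int)
    (c : Char) : (PySem.Set (List Char) × PySem.Dict Int Int) × List Char × Int × Int :=
  let subs := a.2.1 ++ [c]
  let h := a.2.2.1 + ((c.toNat : Int) - 96) * a.2.2.2
  let p := a.2.2.2 * 26
  if PySem.Set.contains a.1.1 subs then (a.1, subs, h, p)
  else ((PySem.Set.add a.1.1 subs, a.1.2.insert h (a.1.2.getD h 0 + 1)), subs, h, p)

def get_count1_alt (s : String) : List (Int × Int) :=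
  let cs := s.toList
  let n : Int := PySem.Str.len s
  ((PySem.List.pyRange 0 n 1).foldl (fun st i =>
      ((PySem.List.slice cs (some i) (some (i + (n - 1)))).foldl pvStepB
        (st, ([] : List Char), (0 : Int), (1 : Int))).1)
    ((PySem.Set.empty : PySem.Set (List Char)), (PySem.Dict.empty : PySem.Dict Int Int))).2.items

-- ===== PRECONDITION & SPEC =====
-- A raises AssertionError on the empty string; Pre_ excludes exactly that input.
def Pre_get_count1 (s : String) : Prop := s ≠ ""
instance (s : String) : Decidable (Pre_get_count1 s) := by unfold Pre_get_count1; infer_instance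
def pvWitness_get_count1 : String := "abcab"

def Spec_get_count1 (s : String) (out : List (Int × Int)) : Prop := out = get_count1_alt s
instance (s : String) (out : List (Int × Int)) : Decidable (Spec_get_count1 s out) := by
  unfold Spec_get_count1; infer_instance

-- ===== CLAIM (what is proved, stated in full; the proofs are below) =====
def Claim_equal_get_count1 : Prop :=
  ∀ (s : String), Dom_get_count1 s → Pre_get_count1 s → Spec_get_count1 s (get_count1 s)

-- ===== LEMMAS AND PROOFS =====

-- canonical base-26 hash of a substring, low-order digit first
def pvHsh : List Char → Int
  | [] => 0
  | c :: t => ((c.toNat : Int) - 96) + 26 * pvHsh t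

-- canonical step shared by both proofs: record the substring if new, counting its hash
def pvStep (st : PySem.Set (List Char) × PySem.Dict Int Int) (subs : List Char) :
    PySem.Set (List Char) × PySem.Dict Int Int :=
  if PySem.Set.contains st.1 subs then st
  else (PySem.Set.add st.1 subs,
        st.2.insert (pvHsh subs) (st.2.getD (pvHsh subs) 0 + 1))

theorem pvEnumFold (t : List Char) : ∀ (k : Nat) (acc : Int),
    (PySem.List.enumerate t (k : Int)).foldl
      (fun acc kc => acc + ((kc.2.toNat : Int) - 96) * 26 ^ kc.1.toNat) acc
    = acc + 26 ^ k * pvHsh t := by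
  induction t with
  | nil => intro k acc; simp [PySem.List.enumerate_nil, pvHsh]
  | cons c t ih =>
    intro k acc
    rw [PySem.List.enumerate_cons]
    have : ((k : Int) + 1) = ((k + 1 : Nat) : Int) := by push_cast; ring
    simp only [List.foldl_cons, this, ih (k + 1)]
    simp [pvHsh, Int.toNat_natCast]
    ring

theorem pvHashA_eq (t : List Char) : pvHashA t = pvHsh t := by
  have := pvEnumFold t 0 0
  simpa [pvHashA] using this

theorem pvStepA_eq : pvStepA = pvStep := by
  funext st subs
  unfold pvStepA pvStep
  rw [pvHashA_eq]

theorem pvHsh_append (t : List Char) (c : Char) :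
    pvHsh (t ++ [c]) = pvHsh t + ((c.toNat : Int) - 96) * 26 ^ t.length := by
  induction t with
  | nil => simp [pvHsh]
  | cons d t ih => simp [pvHsh, ih]; ring

theorem pvStepB_eq (st : PySem.Set (List Char) × PySem.Dict Int Int) (t : List Char) (c : Char) :
    pvStepB (st, t, pvHsh t, 26 ^ t.length)
    c = (pvStep st (t ++ [c]), t ++ [c], pvHsh (t ++ [c]), 26 ^ (t ++ [c]).length) := by
  simp only [pvStepB, pvStep, ← pvHsh_append]
  split
  · simp [pow_succ]
  · simp [pow_succ]

theorem pvBFold (u : List Char) : ∀ (st : PySem.Set (List Char) × PySem.Dict Int Int)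
    (t : List Char),
    u.foldl pvStepB (st, t, pvHsh t, 26 ^ t.length)
    = (((List.range u.length).map (fun k => t ++ u.take (k + 1))).foldl pvStep st,
       t ++ u, pvHsh (t ++ u), 26 ^ (t ++ u).length) := by
  induction u with
  | nil => intro st t; simp
  | cons c u ih =>
    intro st t
    rw [List.foldl_cons, pvStepB_eq, ih]
    have hlist : (List.range (c :: u).length).map (fun k => t ++ (c :: u).take (k + 1))
        = (t ++ [c]) :: (List.range u.length).map (fun k => (t ++ [c]) ++ u.take (k + 1)) := by
      rw [List.length_cons, List.range_succ_eq_map]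
      simp [List.map_map, Function.comp]
    rw [hlist, List.foldl_cons]
    simp

theorem pvStep_mono {st : PySem.Set (List Char) × PySem.Dict Int Int} {p x : List Char}
    (h : x ∈ st.1) : x ∈ (pvStep st p).1 := by
  unfold pvStep; split
  · exact h
  · simpa [PySem.Set.mem_add] using Or.inl h

theorem pvFold_mono {l : List (List Char)} {x : List Char} :
    ∀ {st : PySem.Set (List Char) × PySem.Dict Int Int},
    x ∈ st.1 → x ∈ (l.foldl pvStep st).1 := by
  induction l with
  | nil => intro st h; exact h
  | cons p l ih => intro st h; exact ih (pvStep_mono h)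

theorem pvStep_self_mem (st : PySem.Set (List Char) × PySem.Dict Int Int) (p : List Char) :
    p ∈ (pvStep st p).1 := by
  unfold pvStep; split
  · next hc => exact (PySem.Set.contains_iff st.1 p).mp hc
  · simp [PySem.Set.mem_add]

theorem pvMem_fold_of_mem {l : List (List Char)} {x : List Char}
    (hx : x ∈ l) : ∀ (st : PySem.Set (List Char) × PySem.Dict Int Int),
    x ∈ (l.foldl pvStep st).1 := by
  induction l with
  | nil => cases hx
  | cons p l ih =>
    intro st
    rcases List.mem_cons.mp hx with h | h
    · subst h; rw [List.foldl_cons]; exact pvFold_mono (pvStep_self_mem st x)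
    · rw [List.foldl_cons]; exact ih h _

theorem pvStep_of_mem {st : PySem.Set (List Char) × PySem.Dict Int Int} {x : List Char}
    (h : x ∈ st.1) : pvStep st x = st := by
  unfold pvStep
  rw [if_pos ((PySem.Set.contains_iff st.1 x).mpr h)]

theorem pvFold_replicate (r : Nat) {x : List Char}
    {st : PySem.Set (List Char) × PySem.Dict Int Int} (h : x ∈ st.1) :
    (List.replicate r x).foldl pvStep st = st := by
  induction r with
  | zero => rfl
  | succ r ih => rw [List.replicate_succ, List.foldl_cons, pvStep_of_mem h]; exact ih

-- the candidate list A scans for one start position: the nonempty prefixes of the clamped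
-- slice, followed by repeats of that slice (Python's slicing clamps past the end)
theorem pvTakeMapRange (t : List Char) (M : Nat) :
    (List.range M).map (fun k => t.take (k + 1))
    = ((List.range (min M t.length)).map (fun k => (t.take M).take (k + 1)))
      ++ List.replicate (M - min M t.length) (t.take M) := by
  apply List.ext_getElem
  · simp only [List.length_map, List.length_range, List.length_append, List.length_replicate]
    omega
  · intro k h1 h2
    simp only [List.getElem_map, List.getElem_range] at h1 ⊢
    rw [List.length_map, List.length_range] at h1
    by_cases hk : k < min M t.length
    · rw [List.getElem_append_left (by simp; omega)]
      simp only [List.getElem_map, List.getElem_range]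
      rw [List.take_take]
      congr 1
      omega
    · rw [List.getElem_append_right (by simp; omega)]
      rw [List.getElem_replicate]
      rw [List.take_of_length_le (by omega), List.take_of_length_le (by omega)]

theorem pvInnerEq (t : List Char) (M : Nat) (ht : t ≠ [])
    (st : PySem.Set (List Char) × PySem.Dict Int Int) :
    ((List.range M).map (fun k => t.take (k + 1))).foldl pvStep st
    = ((List.range (min M t.length)).map (fun k => (t.take M).take (k + 1))).foldl pvStep st := by
  rw [pvTakeMapRange, List.foldl_append]
  rcases Nat.eq_zero_or_pos (M - min M t.length) with hr | hr
  · rw [hr]; rfl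
  · have hlt : t.length < M := by omega
    have hlen : 0 < t.length := List.length_pos_of_ne_nil ht
    have hmem : t.take M ∈ (List.range (min M t.length)).map
        (fun k => (t.take M).take (k + 1)) := by
      refine List.mem_map.mpr ⟨t.length - 1, List.mem_range.mpr (by omega), ?_⟩
      rw [show t.take M = t from List.take_of_length_le (by omega)]
      exact List.take_of_length_le (by omega)
    exact pvFold_replicate _ (pvMem_fold_of_mem hmem st)

-- ===== VERDICT (by name: the statement is the Claim_ definition above) =====
theorem get_count1_spec : Claim_equal_get_count1 := by
  intro s _ hpre
  unfold Spec_get_count1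
  have hnil : s.toList ≠ [] := by simpa [String.toList_eq_nil_iff] using hpre
  have hN : 1 ≤ s.toList.length := List.length_pos_of_ne_nil hnil
  simp only [get_count1, get_count1_alt, PySem.Str.len_eq]
  congr 1
  rw [PySem.List.pyRange_one 0 (s.toList.length : Int)]
  have h0 : ((s.toList.length : Int) - 0).toNat = s.toList.length := by omega
  rw [h0, List.foldl_map, List.foldl_map]
  congr 1
  apply PySem.List.foldl_congr_mem
  intro st k hk
  have hkN : k < s.toList.length := List.mem_range.mp hk
  -- left side: A's inner loop over j, as a canonical fold over the scanned substrings
  rw [PySem.List.pyRange_one 1 (s.toList.length : Int)]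
  have h1 : ((s.toList.length : Int) - 1).toNat = s.toList.length - 1 := by omega
  rw [h1, List.foldl_map]
  have hA : ∀ st' (m : Nat), m ∈ List.range (s.toList.length - 1) →
      pvStepA st' (PySem.List.slice s.toList (some (0 + (k : Int)))
        (some ((0 + (k : Int)) + (1 + (m : Int)))))
      = pvStep st' ((s.toList.drop k).take (m + 1)) := by
    intro st' m _
    have hcast : (0 + (k : Int)) + (1 + (m : Int)) = (k : Int) + ((m + 1 : Nat) : Int) := by
      push_cast; ring
    rw [hcast]
    have hz : (0 + (k : Int)) = ((k : Nat) : Int) := by ring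
    rw [hz, PySem.List.slice_natCast_add, pvStepA_eq]
  rw [PySem.List.foldl_congr_mem _ _ _ st hA]
  -- right side: B's inner loop over the clamped slice, via the incremental-hash invariant
  have hc2 : (0 + (k : Int)) + ((s.toList.length : Int) - 1)
      = (k : Int) + ((s.toList.length - 1 : Nat) : Int) := by omega
  rw [hc2]
  have hz : (0 + (k : Int)) = ((k : Nat) : Int) := by ring
  rw [hz, PySem.List.slice_natCast_add]
  have hinit : (st, ([] : List Char), (0 : Int), (1 : Int))
      = (st, ([] : List Char), pvHsh [], 26 ^ ([] : List Char).length) := by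
    simp [pvHsh]
  rw [hinit, pvBFold]
  simp only [List.nil_append]
  rw [← List.foldl_map, List.length_take]
  exact pvInnerEq (s.toList.drop k) (s.toList.length - 1) (by simpa using hkN) st
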